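-- pv_equiv track=rewrite | github.com/motokikando/code_algorithm | ABC/Medium/c_plus.py | get
-- ===== SOURCE A (Python) =====
-- def get(s:str)-> int:
--     a = [0]*(len(s)+1)
--     for i in range(len(s)):
--         if s[i] == "<":
--             a[i+1] = a[i]+1
--     for i in range(len(s)-1, -1, -1):
--         if s[i] == ">":
--             #  a[i] > a[i+1] を比較
--             a[i] = max(a[i+1]+1, a[i])
--     return sum(a)
-- ===== SOURCE B (Python) =====
-- def get(s: str) -> int:
--     # One skip-ahead pass over maximal runs: each '<'-run (length L) optionally
--     # followed by a '>'-run (length M) contributes the closed form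
--     # L*(L-1)//2 + max(L, M) + M*(M-1)//2; a standalone '>'-run contributes
--     # L*(L+1)//2; runs of other characters contribute nothing.
--     n = len(s)
--     total = 0
--     i = 0
--     while i < n:
--         c = s[i]
--         j = i + 1
--         while j < n and s[j] == c:
--             j += 1
--         if c == '<':
--             k = j
--             while k < n and s[k] == '>':
--                 k += 1
--             L = j - i
--             M = k - j
--             total += L * (L - 1) // 2 + max(L, M) + M * (M - 1) // 2
--             i = k
--         elif c == '>':
--             L = j - i
--             total += L * (L + 1) // 2
--             i = j
--         else:
--             i = j
--     return total
-- ===== Notes on version B (the rewrite author's own statement) =====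
-- stated objective: alternative
-- what changed: B replaces A's two positionwise array passes (fill a[], then backward in-place max-relaxation, then sum) by a single skip-ahead pass over maximal character runs that adds a closed-form triangular-number contribution L*(L-1)//2 + max(L,M) + M*(M-1)//2 per '<'-run/'>'-run pair, maintaining no array at all.
import Mathlib
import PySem

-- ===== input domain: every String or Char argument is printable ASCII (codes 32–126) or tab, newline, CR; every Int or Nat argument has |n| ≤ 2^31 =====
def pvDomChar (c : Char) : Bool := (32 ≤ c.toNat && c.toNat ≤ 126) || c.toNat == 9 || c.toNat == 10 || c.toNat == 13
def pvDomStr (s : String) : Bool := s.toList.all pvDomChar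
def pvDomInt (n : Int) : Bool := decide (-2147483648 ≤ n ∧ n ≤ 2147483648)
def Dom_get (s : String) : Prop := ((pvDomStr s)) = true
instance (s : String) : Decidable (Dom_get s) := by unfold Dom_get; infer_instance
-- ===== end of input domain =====

-- B replaces A's two positionwise array passes and in-place max-relaxation by a single
-- skip-ahead pass over maximal character runs with closed-form triangular contributions
-- (objective: alternative).

-- ===== PORT A =====
-- first loop body: if s[i] == "<": a[i+1] = a[i]+1
def pvStep1 (cs : List Char) (a : List Int) (i : Nat) : List Int :=
  if cs.getD i ' ' = '<' then a.set (i+1) (a.getD i 0 + 1) else a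

-- second loop body: if s[i] == ">": a[i] = max(a[i+1]+1, a[i])
def pvStep2 (cs : List Char) (a : List Int) (i : Nat) : List Int :=
  if cs.getD i ' ' = '>' then a.set i (max (a.getD (i+1) 0 + 1) (a.getD i 0)) else a

def get (s : String) : Int :=
  let cs := s.toList
  let n := cs.length
  let a0 : List Int := List.replicate (n+1) 0
  let a1 := (List.range n).foldl (pvStep1 cs) a0
  let a2 := ((List.range n).reverse).foldl (pvStep2 cs) a1   -- range(len(s)-1, -1, -1)
  a2.sum

-- ===== PORT B =====
-- inner while loop `while j < n and s[j] == ch: j += 1` (returns the final j)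
def pvRunEnd (cs : List Char) (ch : Char) (j : Nat) : Nat :=
  if h : j < cs.length ∧ cs.getD j ' ' = ch then pvRunEnd cs ch (j+1) else j
termination_by cs.length - j
decreasing_by omega

-- termination helper for pvGo (cited by the port's decreasing_by)
theorem pvRunEnd_ge (cs : List Char) (ch : Char) : ∀ (d j : Nat), cs.length - j ≤ d → j ≤ pvRunEnd cs ch j := by
  intro d
  induction d with
  | zero =>
      intro j hj
      rw [pvRunEnd]
      split
      · omega
      · exact le_refl j
  | succ d ih =>
      intro j hj
      rw [pvRunEnd]
      split
      · rename_i h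
        have := ih (j+1) (by omega)
        omega
      · exact le_refl j

-- outer while loop of Source B with its accumulator `total`; indices are Nat (they are
-- nonnegative in Python here, and the run lengths L, M are nonnegative, so Nat `/` 2
-- agrees with Python's `//` on every value computed)
def pvGo (cs : List Char) (i : Nat) (total : Int) : Int :=
  if hi : i < cs.length then
    let c := cs.getD i ' '
    let j := pvRunEnd cs c (i+1)
    if c = '<' then
      let k := pvRunEnd cs '>' j
      let L := j - i
      let M := k - j
      pvGo cs k (total + ((L * (L - 1) / 2 : Nat) : Int) + ((max L M : Nat) : Int) + ((M * (M - 1) / 2 : Nat) : Int))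
    else if c = '>' then
      let L := j - i
      pvGo cs j (total + ((L * (L + 1) / 2 : Nat) : Int))
    else
      pvGo cs j total
  else total
termination_by cs.length - i
decreasing_by
  · have h1 := pvRunEnd_ge cs (cs.getD i ' ') cs.length (i+1) (by omega)
    have h2 := pvRunEnd_ge cs '>' cs.length (pvRunEnd cs (cs.getD i ' ') (i+1)) (by omega)
    omega
  · have h1 := pvRunEnd_ge cs (cs.getD i ' ') cs.length (i+1) (by omega)
    omega
  · have h1 := pvRunEnd_ge cs (cs.getD i ' ') cs.length (i+1) (by omega)
    omega

def get_alt (s : String) : Int := pvGo s.toList 0 0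

-- ===== PRECONDITION & SPEC =====
def Spec_get (s : String) (out : Int) : Prop := out = get_alt s
instance (s : String) (out : Int) : Decidable (Spec_get s out) := by unfold Spec_get; infer_instance

-- ===== CLAIM (what is proved, stated in full; the proofs are below) =====
def Claim_equal_get : Prop := ∀ (s : String), Dom_get s → Spec_get s (get s)

-- ===== LEMMAS AND PROOFS =====

-- up/down boundary values: upF i = length of the maximal '<'-run ending at boundary i,
-- downF i = length of the maximal '>'-run starting at boundary i
def upF (cs : List Char) : Nat → Int
  | 0 => 0
  | i+1 => if cs.getD i ' ' = '<' then upF cs i + 1 else 0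

def downF (cs : List Char) (i : Nat) : Int :=
  if h : i < cs.length then
    if cs.getD i ' ' = '>' then downF cs (i+1) + 1 else 0
  else 0
termination_by cs.length - i

-- suffix sum of max(upF, downF) over boundaries i..cs.length
def msum (cs : List Char) (i : Nat) : Int :=
  if h : i ≤ cs.length then max (upF cs i) (downF cs i) + msum cs (i+1) else 0
termination_by cs.length + 1 - i

def triR : Nat → Nat
  | 0 => 0
  | m+1 => triR m + m


-- ---------- A-side machinery (invariants for A's two foldl passes) ----------

def pvScan (ch : Char) (p : Int) : List Char → List Int
  | [] => []
  | c :: cs =>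
      let v : Int := if c = ch then p + 1 else 0
      v :: pvScan ch v cs

def pvU (cs : List Char) : List Int := 0 :: pvScan '<' 0 cs
def pvD (cs : List Char) : List Int := (0 :: pvScan '>' 0 cs.reverse).reverse

theorem pvScan_length (ch : Char) : ∀ (l : List Char) (p : Int), (pvScan ch p l).length = l.length := by
  intro l
  induction l with
  | nil => intro p; rfl
  | cons c cs ih => intro p; simp [pvScan, ih]

theorem getD_set_int (l : List Int) (i j : Nat) (v : Int) :
    (l.set i v).getD j 0 = if i = j ∧ i < l.length then v else l.getD j 0 := by
  simp only [List.getD, List.getElem?_set]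
  split_ifs with h1 h2 h3 <;> simp_all
  omega

theorem pvScan_rec (ch : Char) : ∀ (l : List Char) (p : Int) (k : Nat), k < l.length →
    (p :: pvScan ch p l).getD (k+1) 0 =
      if l.getD k ' ' = ch then (p :: pvScan ch p l).getD k 0 + 1 else 0 := by
  intro l
  induction l with
  | nil => intro p k hk; simp at hk
  | cons c cs ih =>
      intro p k hk
      cases k with
      | zero => simp [pvScan]
      | succ k' =>
          have hk' : k' < cs.length := by simpa using hk
          have := ih (if c = ch then p + 1 else 0) k' hk'
          simpa [pvScan] using this

theorem pvScan_nonneg (ch : Char) : ∀ (l : List Char) (p : Int), 0 ≤ p →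
    ∀ x ∈ pvScan ch p l, 0 ≤ x := by
  intro l
  induction l with
  | nil => intro p hp x hx; simp [pvScan] at hx
  | cons c cs ih =>
      intro p hp x hx
      have hv : (0:Int) ≤ if c = ch then p + 1 else 0 := by split <;> omega
      simp only [pvScan, List.mem_cons] at hx
      rcases hx with rfl | hx
      · exact hv
      · exact ih _ hv x hx

theorem getD_nonneg (l : List Int) (h : ∀ x ∈ l, 0 ≤ x) (i : Nat) : 0 ≤ l.getD i 0 := by
  by_cases hi : i < l.length
  · rw [List.getD_eq_getElem l 0 hi]; exact h _ (List.getElem_mem hi)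
  · rw [List.getD_eq_default l 0 (by omega)]

theorem pvU_length (cs : List Char) : (pvU cs).length = cs.length + 1 := by
  simp [pvU, pvScan_length]

theorem pvD_length (cs : List Char) : (pvD cs).length = cs.length + 1 := by
  simp [pvD, pvScan_length]

theorem pvU_zero (cs : List Char) : (pvU cs).getD 0 0 = 0 := rfl

theorem pvU_rec (cs : List Char) (k : Nat) (hk : k < cs.length) :
    (pvU cs).getD (k+1) 0 = if cs.getD k ' ' = '<' then (pvU cs).getD k 0 + 1 else 0 :=
  pvScan_rec '<' cs 0 k hk

theorem pvU_nonneg (cs : List Char) (i : Nat) : 0 ≤ (pvU cs).getD i 0 := by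
  refine getD_nonneg _ (fun x hx => ?_) i
  simp only [pvU, List.mem_cons] at hx
  rcases hx with rfl | hx
  · exact le_refl 0
  · exact pvScan_nonneg '<' cs 0 (le_refl 0) x hx

theorem pvD_nonneg (cs : List Char) (i : Nat) : 0 ≤ (pvD cs).getD i 0 := by
  refine getD_nonneg _ (fun x hx => ?_) i
  simp only [pvD, List.mem_reverse, List.mem_cons] at hx
  rcases hx with rfl | hx
  · exact le_refl 0
  · exact pvScan_nonneg '>' cs.reverse 0 (le_refl 0) x hx

theorem pvU_hi (cs : List Char) (i : Nat) (h : cs.length < i) : (pvU cs).getD i 0 = 0 := by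
  rw [List.getD_eq_default]
  rw [pvU_length]; omega

theorem pvD_hi (cs : List Char) (i : Nat) (h : cs.length < i) : (pvD cs).getD i 0 = 0 := by
  rw [List.getD_eq_default]
  rw [pvD_length]; omega

theorem pvD_last (cs : List Char) : (pvD cs).getD cs.length 0 = 0 := by
  have hS : (pvScan '>' 0 cs.reverse).reverse.length = cs.length := by
    simp [pvScan_length]
  rw [pvD, List.reverse_cons, List.getD_append_right _ _ _ _ (by omega), hS]
  simp

theorem pvD_getD (cs : List Char) (i : Nat) (hi : i ≤ cs.length) :
    (pvD cs).getD i 0 = (0 :: pvScan '>' 0 cs.reverse).getD (cs.length - i) 0 := by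
  have hL : (0 :: pvScan '>' 0 cs.reverse).length = cs.length + 1 := by
    simp [pvScan_length]
  have h1 : i < (0 :: pvScan '>' 0 cs.reverse).reverse.length := by
    rw [List.length_reverse, hL]; omega
  have h2 : cs.length - i < (0 :: pvScan '>' 0 cs.reverse).length := by
    rw [hL]; omega
  rw [pvD, List.getD_eq_getElem _ _ h1, List.getD_eq_getElem _ _ h2, List.getElem_reverse]
  have he : (0 :: pvScan '>' 0 cs.reverse).length - 1 - i = cs.length - i := by
    rw [hL]; omega
  simp only [he]

theorem pvD_rec (cs : List Char) (i : Nat) (hi : i < cs.length) :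
    (pvD cs).getD i 0 = if cs.getD i ' ' = '>' then (pvD cs).getD (i+1) 0 + 1 else 0 := by
  have hlen : cs.reverse.length = cs.length := by simp
  have e1 : cs.length - i = (cs.length - (i+1)) + 1 := by omega
  have hrev : cs.reverse.getD (cs.length - (i+1)) ' ' = cs.getD i ' ' := by
    have hj : cs.length - (i+1) < cs.reverse.length := by omega
    rw [List.getD_eq_getElem _ _ hj, List.getD_eq_getElem _ _ hi, List.getElem_reverse]
    have he : cs.length - 1 - (cs.length - (i+1)) = i := by omega
    simp only [he]
  rw [pvD_getD cs i (by omega), pvD_getD cs (i+1) (by omega), e1,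
      pvScan_rec '>' cs.reverse 0 _ (by omega), hrev]

theorem getD_replicate_zero (m i : Nat) : (List.replicate m (0:Int)).getD i 0 = 0 := by
  by_cases h : i < m
  · rw [List.getD_eq_getElem _ _ (by simpa using h)]; simp
  · rw [List.getD_eq_default]; simp; omega

theorem loop1 (cs : List Char) : ∀ (k : Nat), k ≤ cs.length →
    ((List.range k).foldl (pvStep1 cs) (List.replicate (cs.length+1) 0)).length = cs.length + 1 ∧
    (∀ i, i ≤ k → ((List.range k).foldl (pvStep1 cs) (List.replicate (cs.length+1) 0)).getD i 0 = (pvU cs).getD i 0) ∧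
    (∀ i, k < i → ((List.range k).foldl (pvStep1 cs) (List.replicate (cs.length+1) 0)).getD i 0 = 0) := by
  intro k
  induction k with
  | zero =>
      intro _
      simp only [List.range_zero, List.foldl_nil]
      refine ⟨by simp, ?_, fun i _ => getD_replicate_zero _ _⟩
      intro i hi
      have h0 : i = 0 := by omega
      subst h0
      rw [getD_replicate_zero, pvU_zero]
  | succ k ih =>
      intro hk
      obtain ⟨hlen, hlo, hhi⟩ := ih (by omega)
      rw [List.range_succ, List.foldl_append, List.foldl_cons, List.foldl_nil]
      have hUrec := pvU_rec cs k (by omega)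
      simp only [pvStep1] at hlen hlo hhi ⊢
      by_cases hc : cs.getD k ' ' = '<'
      · rw [if_pos hc]
        refine ⟨by rw [List.length_set]; exact hlen, ?_, ?_⟩
        · intro i hi
          rw [getD_set_int]
          by_cases he : k+1 = i
          · subst he
            rw [if_pos ⟨rfl, by omega⟩, hlo k (le_refl k), hUrec, if_pos hc]
          · rw [if_neg (fun h => he h.1)]
            exact hlo i (by omega)
        · intro i hi
          rw [getD_set_int, if_neg (fun h => by omega)]
          exact hhi i (by omega)
      · rw [if_neg hc]
        refine ⟨hlen, ?_, fun i hi => hhi i (by omega)⟩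
        intro i hi
        by_cases he : i = k+1
        · subst he
          rw [hhi (k+1) (by omega), hUrec, if_neg hc]
        · exact hlo i (by omega)

theorem loop2 (cs : List Char) : ∀ (j : Nat), j ≤ cs.length → ∀ (a : List Int),
    a.length = cs.length + 1 →
    (∀ i, i < j → a.getD i 0 = (pvU cs).getD i 0) →
    (∀ i, j ≤ i → a.getD i 0 = max ((pvU cs).getD i 0) ((pvD cs).getD i 0)) →
    (((List.range j).reverse).foldl (pvStep2 cs) a).length = cs.length + 1 ∧
    ∀ i, (((List.range j).reverse).foldl (pvStep2 cs) a).getD i 0 = max ((pvU cs).getD i 0) ((pvD cs).getD i 0) := by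
  intro j
  induction j with
  | zero =>
      intro _ a ha h1 h2
      simp only [List.range_zero, List.reverse_nil, List.foldl_nil]
      exact ⟨ha, fun i => h2 i (Nat.zero_le i)⟩
  | succ j ih =>
      intro hj a ha h1 h2
      have hrev : (List.range (j+1)).reverse = j :: (List.range j).reverse := by
        rw [List.range_succ, List.reverse_append, List.reverse_singleton]; rfl
      rw [hrev, List.foldl_cons]
      have hUj := pvU_rec cs j (by omega)
      have hDj := pvD_rec cs j (by omega)
      refine ih (by omega) (pvStep2 cs a j) ?_ ?_ ?_
      · unfold pvStep2; split
        · rw [List.length_set]; exact ha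
        · exact ha
      · intro i hi
        unfold pvStep2
        split
        · rw [getD_set_int, if_neg (fun h => by omega)]
          exact h1 i (by omega)
        · exact h1 i (by omega)
      · intro i hi
        by_cases he : i = j
        · subst he
          unfold pvStep2
          by_cases hc : cs.getD i ' ' = '>'
          · rw [if_pos hc, getD_set_int, if_pos ⟨rfl, by omega⟩,
                h2 (i+1) (by omega), h1 i (by omega)]
            have hU1 : (pvU cs).getD (i+1) 0 = 0 := by
              rw [hUj, hc, if_neg (by decide)]
            have hD : (pvD cs).getD i 0 = (pvD cs).getD (i+1) 0 + 1 := by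
              rw [hDj, if_pos hc]
            have hDn := pvD_nonneg cs (i+1)
            have hUn := pvU_nonneg cs i
            rw [hU1, hD]
            omega
          · rw [if_neg hc, h1 i (by omega)]
            have hD0 : (pvD cs).getD i 0 = 0 := by rw [hDj, if_neg hc]
            have hUn := pvU_nonneg cs i
            rw [hD0]
            omega
        · have hstep : (pvStep2 cs a j).getD i 0 = a.getD i 0 := by
            unfold pvStep2
            split
            · rw [getD_set_int, if_neg (fun h => he h.1.symm)]
            · rfl
          rw [hstep]
          exact h2 i (by omega)

-- ---------- bridges between the list tables pvU/pvD and upF/downF ----------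

theorem upF_zero (cs : List Char) : upF cs 0 = 0 := rfl

theorem upF_succ (cs : List Char) (i : Nat) :
    upF cs (i+1) = if cs.getD i ' ' = '<' then upF cs i + 1 else 0 := rfl

theorem downF_hi (cs : List Char) (i : Nat) (h : cs.length ≤ i) : downF cs i = 0 := by
  rw [downF, dif_neg (by omega)]

theorem downF_rec (cs : List Char) (i : Nat) (h : i < cs.length) :
    downF cs i = if cs.getD i ' ' = '>' then downF cs (i+1) + 1 else 0 := by
  rw [downF, dif_pos h]

theorem downF_nonneg (cs : List Char) : ∀ (d i : Nat), cs.length - i ≤ d → 0 ≤ downF cs i := by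
  intro d
  induction d with
  | zero => intro i hi; rw [downF_hi cs i (by omega)]
  | succ d ih =>
      intro i hi
      by_cases h : i < cs.length
      · rw [downF_rec cs i h]
        have := ih (i+1) (by omega)
        split <;> omega
      · rw [downF_hi cs i (by omega)]

theorem downF_nn (cs : List Char) (i : Nat) : 0 ≤ downF cs i :=
  downF_nonneg cs cs.length i (by omega)

theorem downF_zero_of (cs : List Char) (i : Nat) (h : cs.getD i ' ' ≠ '>') : downF cs i = 0 := by
  by_cases hi : i < cs.length
  · rw [downF_rec cs i hi, if_neg h]
  · rw [downF_hi cs i (by omega)]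

theorem upF_bridge (cs : List Char) : ∀ i, (pvU cs).getD i 0 = upF cs i := by
  intro i
  induction i with
  | zero => rw [pvU_zero, upF_zero]
  | succ i ih =>
      by_cases h : i < cs.length
      · rw [pvU_rec cs i h, upF_succ, ih]
      · have hg : cs.getD i ' ' = ' ' := by
          rw [List.getD_eq_default]; omega
        rw [pvU_hi cs (i+1) (by omega), upF_succ, hg, if_neg (by decide)]

theorem downF_bridge (cs : List Char) : ∀ (d i : Nat), cs.length - i ≤ d →
    (pvD cs).getD i 0 = downF cs i := by
  intro d
  induction d with
  | zero =>
      intro i hi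
      rcases Nat.lt_or_ge cs.length i with h | h
      · rw [pvD_hi cs i h, downF_hi cs i (by omega)]
      · have he : i = cs.length := by omega
        subst he
        rw [pvD_last, downF_hi cs _ (le_refl _)]
  | succ d ih =>
      intro i hi
      by_cases h : i < cs.length
      · rw [pvD_rec cs i h, downF_rec cs i h, ih (i+1) (by omega)]
      · rcases Nat.lt_or_ge cs.length i with h2 | h2
        · rw [pvD_hi cs i h2, downF_hi cs i (by omega)]
        · have he : i = cs.length := by omega
          subst he
          rw [pvD_last, downF_hi cs _ (le_refl _)]

-- ---------- msum and triangular numbers ----------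

theorem msum_rec (cs : List Char) (i : Nat) (h : i ≤ cs.length) :
    msum cs i = max (upF cs i) (downF cs i) + msum cs (i+1) := by
  rw [msum, dif_pos h]

theorem msum_hi (cs : List Char) (i : Nat) (h : cs.length < i) : msum cs i = 0 := by
  rw [msum, dif_neg (by omega)]

theorem triR_succ (m : Nat) : triR (m+1) = triR m + m := rfl

theorem two_triR : ∀ (m : Nat), 2 * triR m = m * (m - 1) := by
  intro m
  induction m with
  | zero => rfl
  | succ m ih =>
      rw [triR_succ, Nat.mul_add, ih]
      cases m with
      | zero => rfl
      | succ t => simp only [Nat.succ_sub_one]; ring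

theorem triR_div (m : Nat) : triR m = m * (m - 1) / 2 := by
  have := two_triR m
  omega

-- ---------- specification of the run-end scanner ----------

theorem runEnd_spec (cs : List Char) (ch : Char) : ∀ (d j0 : Nat), cs.length - j0 ≤ d → j0 ≤ cs.length →
    j0 ≤ pvRunEnd cs ch j0 ∧ pvRunEnd cs ch j0 ≤ cs.length ∧
    (∀ r, j0 ≤ r → r < pvRunEnd cs ch j0 → cs.getD r ' ' = ch) ∧
    (pvRunEnd cs ch j0 < cs.length → cs.getD (pvRunEnd cs ch j0) ' ' ≠ ch) := by
  intro d
  induction d with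
  | zero =>
      intro j0 hd hj
      have he : j0 = cs.length := by omega
      rw [pvRunEnd, dif_neg (by omega)]
      exact ⟨le_refl _, by omega, fun r h1 h2 => by omega, fun h => by omega⟩
  | succ d ih =>
      intro j0 hd hj
      rw [pvRunEnd]
      by_cases hc : j0 < cs.length ∧ cs.getD j0 ' ' = ch
      · rw [dif_pos hc]
        obtain ⟨h1, h2, h3, h4⟩ := ih (j0+1) (by omega) (by omega)
        refine ⟨by omega, h2, ?_, h4⟩
        intro r hr1 hr2
        by_cases hr : r = j0
        · subst hr; exact hc.2
        · exact h3 r (by omega) hr2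
      · rw [dif_neg hc]
        refine ⟨le_refl _, hj, fun r h1 h2 => by omega, ?_⟩
        intro h hcc
        exact hc ⟨h, hcc⟩

theorem runEnd_props (cs : List Char) (ch : Char) (j0 : Nat) (h : j0 ≤ cs.length) :
    j0 ≤ pvRunEnd cs ch j0 ∧ pvRunEnd cs ch j0 ≤ cs.length ∧
    (∀ r, j0 ≤ r → r < pvRunEnd cs ch j0 → cs.getD r ' ' = ch) ∧
    (pvRunEnd cs ch j0 < cs.length → cs.getD (pvRunEnd cs ch j0) ' ' ≠ ch) :=
  runEnd_spec cs ch cs.length j0 (by omega) h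

-- ---------- values of upF/downF across a run ----------

theorem upRun (cs : List Char) (i j : Nat) (hU : upF cs i = 0)
    (hrun : ∀ r, i ≤ r → r < j → cs.getD r ' ' = '<') :
    ∀ m, i + m ≤ j → upF cs (i + m) = (m : Int) := by
  intro m
  induction m with
  | zero => intro _; simpa using hU
  | succ m ih =>
      intro hm
      have hc : cs.getD (i + m) ' ' = '<' := hrun (i+m) (by omega) (by omega)
      have : i + (m+1) = (i + m) + 1 := by omega
      rw [this, upF_succ, if_pos hc, ih (by omega)]
      push_cast
      ring

theorem downRun (cs : List Char) (j k : Nat) (hkn : k ≤ cs.length) (hDk : downF cs k = 0)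
    (hrun : ∀ r, j ≤ r → r < k → cs.getD r ' ' = '>') :
    ∀ m, m ≤ k - j → downF cs (k - m) = (m : Int) := by
  intro m
  induction m with
  | zero => simpa using hDk
  | succ m ih =>
      intro hm
      have ht : k - (m+1) < cs.length := by omega
      have hc : cs.getD (k - (m+1)) ' ' = '>' := hrun _ (by omega) (by omega)
      have he : k - (m+1) + 1 = k - m := by omega
      rw [downF_rec cs _ ht, if_pos hc, he, ih (by omega)]
      push_cast
      ring

-- ---------- the three chunk lemmas for msum ----------

theorem chunkLt (cs : List Char) (i j : Nat) (hij : i < j) (hjn : j ≤ cs.length)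
    (hU : upF cs i = 0) (hrun : ∀ r, i ≤ r → r < j → cs.getD r ' ' = '<') :
    msum cs (i+1) = (triR (j - i) : Int) + msum cs j := by
  have aux : ∀ m, m < j - i → msum cs (j - m) + (triR (j - i - m) : Int) = (triR (j - i) : Int) + msum cs j := by
    intro m
    induction m with
    | zero => intro _; simp only [Nat.sub_zero]; ring
    | succ m ih =>
        intro hm
        have ht : i < j - (m+1) := by omega
        have htn : j - (m+1) ≤ cs.length := by omega
        have hUt : upF cs (j - (m+1)) = ((j - i - (m+1) : Nat) : Int) := by
          have he : j - (m+1) = i + (j - i - (m+1)) := by omega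
          rw [he]
          exact upRun cs i j hU hrun _ (by omega)
        have hDt : downF cs (j - (m+1)) = 0 := by
          apply downF_zero_of
          rw [hrun _ (by omega) (by omega)]
          decide
        have hmax : max (upF cs (j - (m+1))) (downF cs (j - (m+1))) = ((j - i - (m+1) : Nat) : Int) := by
          rw [hUt, hDt]
          exact max_eq_left (Int.natCast_nonneg _)
        have hstep : j - (m+1) + 1 = j - m := by omega
        have hrec := msum_rec cs (j - (m+1)) htn
        rw [hmax, hstep] at hrec
        have hIH := ih (by omega)
        have htri : (triR (j - i - m) : Nat) = triR (j - i - (m+1)) + (j - i - (m+1)) := by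
          have he : j - i - m = (j - i - (m+1)) + 1 := by omega
          rw [he, triR_succ]
        rw [hrec]
        generalize msum cs (j - m) = X at hIH ⊢
        generalize msum cs j = Y at hIH ⊢
        generalize hA : triR (j - i - (m+1)) = A at htri ⊢
        generalize hB : triR (j - i - m) = B at htri hIH
        generalize hC : triR (j - i) = C at hIH ⊢
        omega
  have := aux (j - i - 1) (by omega)
  have he1 : j - (j - i - 1) = i + 1 := by omega
  have he2 : j - i - (j - i - 1) = 1 := by omega
  rw [he1, he2] at this
  simpa [triR] using this

theorem chunkGt (cs : List Char) (j k : Nat) (hjk : j < k) (hkn : k ≤ cs.length)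
    (hDk : downF cs k = 0) (hrun : ∀ r, j ≤ r → r < k → cs.getD r ' ' = '>') :
    msum cs (j+1) = (triR (k - j) : Int) + msum cs k := by
  have aux : ∀ m, m ≤ k - j - 1 → msum cs (k - m) = (triR (m+1) : Int) + msum cs k := by
    intro m
    induction m with
    | zero => simp [triR]
    | succ m ih =>
        intro hm
        have ht : j < k - (m+1) := by omega
        have htn : k - (m+1) ≤ cs.length := by omega
        have hUt : upF cs (k - (m+1)) = 0 := by
          have he : k - (m+1) = (k - (m+1) - 1) + 1 := by omega
          rw [he, upF_succ, if_neg]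
          rw [hrun _ (by omega) (by omega)]
          decide
        have hDt : downF cs (k - (m+1)) = ((m+1 : Nat) : Int) :=
          downRun cs j k hkn hDk hrun (m+1) (by omega)
        have hmax : max (upF cs (k - (m+1))) (downF cs (k - (m+1))) = ((m+1 : Nat) : Int) := by
          rw [hUt, hDt]
          exact max_eq_right (Int.natCast_nonneg _)
        have hstep : k - (m+1) + 1 = k - m := by omega
        have hrec := msum_rec cs (k - (m+1)) htn
        rw [hmax, hstep, ih (by omega)] at hrec
        rw [hrec, show triR (m + 1 + 1) = triR (m + 1) + (m + 1) from rfl]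
        push_cast
        ring
  have := aux (k - j - 1) (by omega)
  have he1 : k - (k - j - 1) = j + 1 := by omega
  have he2 : k - j - 1 + 1 = k - j := by omega
  rw [he1, he2] at this
  exact this

theorem chunkConst (cs : List Char) (i j : Nat) (c : Char) (hij : i < j) (hjn : j ≤ cs.length)
    (hc1 : c ≠ '<') (hc2 : c ≠ '>') (hrun : ∀ r, i ≤ r → r < j → cs.getD r ' ' = c) :
    msum cs (i+1) = msum cs j := by
  have aux : ∀ m, m ≤ j - i - 1 → msum cs (j - m) = msum cs j := by
    intro m
    induction m with
    | zero => simp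
    | succ m ih =>
        intro hm
        have ht : i < j - (m+1) := by omega
        have htn : j - (m+1) ≤ cs.length := by omega
        have hUt : upF cs (j - (m+1)) = 0 := by
          have he : j - (m+1) = (j - (m+1) - 1) + 1 := by omega
          rw [he, upF_succ, if_neg]
          rw [hrun _ (by omega) (by omega)]
          exact fun h => hc1 h
        have hDt : downF cs (j - (m+1)) = 0 := by
          apply downF_zero_of
          rw [hrun _ (by omega) (by omega)]
          exact fun h => hc2 h
        have hstep : j - (m+1) + 1 = j - m := by omega
        have hrec := msum_rec cs (j - (m+1)) htn
        rw [hUt, hDt, hstep, ih (by omega)] at hrec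
        simpa using hrec
  have := aux (j - i - 1) (by omega)
  have he1 : j - (j - i - 1) = i + 1 := by omega
  rw [he1] at this
  exact this

-- ---------- the main loop invariant of B ----------

theorem goInv (cs : List Char) : ∀ (d i : Nat) (total : Int), cs.length - i ≤ d →
    (upF cs i = 0 ∨ cs.getD i ' ' ≠ '<') →
    pvGo cs i total = total + downF cs i + msum cs (i+1) := by
  intro d
  induction d with
  | zero =>
      intro i total hd _
      rw [pvGo, dif_neg (by omega), downF_hi cs i (by omega), msum_hi cs (i+1) (by omega)]
      ring
  | succ d ih =>
      intro i total hd hyp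
      by_cases hi : i < cs.length
      case neg =>
        rw [pvGo, dif_neg hi, downF_hi cs i (by omega), msum_hi cs (i+1) (by omega)]
        ring
      case pos =>
        rw [pvGo, dif_pos hi]
        obtain ⟨hj1, hj2, hj3, hj4⟩ := runEnd_props cs (cs.getD i ' ') (i+1) (by omega)
        set c := cs.getD i ' ' with hc
        set j := pvRunEnd cs c (i+1) with hjdef
        have hrunc : ∀ r, i ≤ r → r < j → cs.getD r ' ' = c := by
          intro r h1 h2
          by_cases hr : r = i
          · subst hr; rfl
          · exact hj3 r (by omega) h2
        by_cases hlt : c = '<'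
        · rw [if_pos hlt]
          obtain ⟨hk1, hk2, hk3, hk4⟩ := runEnd_props cs '>' j hj2
          set k := pvRunEnd cs '>' j with hkdef
          have hU0 : upF cs i = 0 := by
            rcases hyp with h | h
            · exact h
            · exact absurd hlt h
          have hDk : downF cs k = 0 := by
            by_cases hkn : k < cs.length
            · exact downF_zero_of cs k (hk4 hkn)
            · exact downF_hi cs k (by omega)
          have hDi : downF cs i = 0 := by
            apply downF_zero_of
            rw [← hc, hlt]
            decide
          have hm1 : msum cs (i+1) = (triR (j - i) : Int) + msum cs j := by
            apply chunkLt cs i j (by omega) hj2 hU0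
            intro r h1 h2
            rw [hrunc r h1 h2, hlt]
          have hUj : upF cs j = ((j - i : Nat) : Int) := by
            have h := upRun cs i j hU0
              (fun r h1 h2 => by rw [hrunc r h1 h2, hlt]) (j - i) (by omega)
            rwa [show i + (j - i) = j by omega] at h
          have hDj : downF cs j = ((k - j : Nat) : Int) := by
            have h := downRun cs j k hk2 hDk hk3 (k - j) (le_refl _)
            rwa [show k - (k - j) = j by omega] at h
          have hm2 : msum cs j = max ((j - i : Nat) : Int) ((k - j : Nat) : Int) + msum cs (j+1) := by
            rw [msum_rec cs j hj2, hUj, hDj]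
          have hm3 : msum cs (j+1) = (triR (k - j) : Int) + msum cs (k+1) := by
            by_cases hjk : j < k
            · have hUk : upF cs k = 0 := by
                have he : k = (k - 1) + 1 := by omega
                rw [he, upF_succ, if_neg]
                rw [hk3 (k-1) (by omega) (by omega)]
                decide
              have hmk : msum cs k = msum cs (k+1) := by
                rw [msum_rec cs k hk2, hUk, hDk]
                simp
              rw [chunkGt cs j k hjk hk2 hDk hk3, hmk]
            · have he : j = k := by omega
              rw [he, Nat.sub_self]
              norm_num [triR]
          have hhypk : upF cs k = 0 ∨ cs.getD k ' ' ≠ '<' := by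
            by_cases hjk : j < k
            · left
              have he : k = (k - 1) + 1 := by omega
              rw [he, upF_succ, if_neg]
              rw [hk3 (k-1) (by omega) (by omega)]
              decide
            · right
              have he : j = k := by omega
              by_cases hkn : k < cs.length
              · have h4 := hj4 (by rw [he]; exact hkn)
                rw [hlt] at h4
                rw [← he]
                exact h4
              · rw [List.getD_eq_default]
                · decide
                · omega
          rw [ih k _ (by omega) hhypk, hDk, hDi, hm1, hm2, hm3]
          have hcast1 : ((j - i) * ((j - i) - 1) / 2 : Nat) = triR (j - i) := (triR_div _).symm
          have hcast2 : ((k - j) * ((k - j) - 1) / 2 : Nat) = triR (k - j) := (triR_div _).symm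
          rw [hcast1, hcast2, Nat.cast_max]
          ring
        · rw [if_neg hlt]
          by_cases hgt : c = '>'
          · rw [if_pos hgt]
            have hrun' : ∀ r, i ≤ r → r < j → cs.getD r ' ' = '>' := by
              intro r h1 h2
              rw [hrunc r h1 h2, hgt]
            have hDj : downF cs j = 0 := by
              by_cases hjn : j < cs.length
              · apply downF_zero_of
                intro hx
                exact (hj4 hjn) (by rw [hx, hgt])
              · exact downF_hi cs j (by omega)
            have hDi : downF cs i = ((j - i : Nat) : Int) := by
              have h := downRun cs i j hj2 hDj hrun' (j - i) (le_refl _)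
              rwa [show j - (j - i) = i by omega] at h
            have hm1 : msum cs (i+1) = (triR (j - i) : Int) + msum cs j :=
              chunkGt cs i j (by omega) hj2 hDj hrun'
            have hUj : upF cs j = 0 := by
              have he : j = (j - 1) + 1 := by omega
              rw [he, upF_succ, if_neg]
              rw [hrun' (j-1) (by omega) (by omega)]
              decide
            have hm2 : msum cs j = msum cs (j+1) := by
              rw [msum_rec cs j hj2, hUj, hDj]
              simp
            rw [ih j _ (by omega) (Or.inl hUj), hDj, hDi, hm1, hm2]
            have hcast : ((j - i) * ((j - i) + 1) / 2 : Nat) = triR ((j - i) + 1) := by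
              rw [triR_div ((j - i) + 1)]
              simp [Nat.mul_comm]
            rw [hcast, triR_succ]
            push_cast
            ring
          · rw [if_neg hgt]
            have hDi : downF cs i = 0 := by
              apply downF_zero_of
              rw [← hc]
              exact hgt
            have hm1 : msum cs (i+1) = msum cs j :=
              chunkConst cs i j c (by omega) hj2 hlt hgt hrunc
            have hUj : upF cs j = 0 := by
              have he : j = (j - 1) + 1 := by omega
              rw [he, upF_succ, if_neg]
              rw [hrunc (j-1) (by omega) (by omega)]
              exact fun h => hlt h
            have hm2 : msum cs j = downF cs j + msum cs (j+1) := by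
              rw [msum_rec cs j hj2, hUj, max_eq_right (downF_nn cs j)]
            rw [ih j _ (by omega) (Or.inl hUj), hDi, hm1, hm2]
            ring

-- ---------- summing a table pointwise equal to max(upF, downF) ----------

theorem sum_eq_msum (cs : List Char) : ∀ (l : List Int) (i : Nat),
    l.length = cs.length + 1 - i →
    (∀ r, r < l.length → l.getD r 0 = max (upF cs (i+r)) (downF cs (i+r))) →
    l.sum = msum cs i := by
  intro l
  induction l with
  | nil =>
      intro i hl _
      rw [List.sum_nil, msum_hi cs i (by simp at hl; omega)]
  | cons x t ih =>
      intro i hl hg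
      have hi : i ≤ cs.length := by simp at hl; omega
      have hx : x = max (upF cs i) (downF cs i) := by
        have := hg 0 (by simp)
        simpa using this
      rw [List.sum_cons, msum_rec cs i hi, hx]
      congr 1
      apply ih (i+1)
      · simp at hl ⊢; omega
      · intro r hr
        have := hg (r+1) (by simp at hr ⊢; omega)
        have he : i + (r+1) = (i+1) + r := by omega
        rw [he] at this
        simpa using this

-- ---------- both programs compute msum ----------

theorem A_eq_msum (s : String) : get s = msum s.toList 0 := by
  show ((List.range s.toList.length).reverse.foldl (pvStep2 s.toList)
      ((List.range s.toList.length).foldl (pvStep1 s.toList)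
        (List.replicate (s.toList.length + 1) 0))).sum = msum s.toList 0
  set cs := s.toList with hcs
  obtain ⟨hlen1, hlo1, hhi1⟩ := loop1 cs cs.length (le_refl _)
  have h2 : ∀ i, cs.length ≤ i →
      ((List.range cs.length).foldl (pvStep1 cs) (List.replicate (cs.length+1) 0)).getD i 0
        = max ((pvU cs).getD i 0) ((pvD cs).getD i 0) := by
    intro i hi
    by_cases he : i = cs.length
    · subst he
      rw [hlo1 _ (le_refl _), pvD_last]
      have := pvU_nonneg cs cs.length
      omega
    · have hgt : cs.length < i := by omega
      rw [hhi1 i hgt, pvU_hi cs i hgt, pvD_hi cs i hgt]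
      simp
  obtain ⟨hlen2, hall⟩ := loop2 cs cs.length (le_refl _) _ hlen1
    (fun i hi => hlo1 i (by omega)) h2
  apply sum_eq_msum
  · rw [hlen2]; omega
  · intro r _
    rw [hall r, upF_bridge cs r, downF_bridge cs cs.length r (by omega)]
    simp

theorem B_eq_msum (s : String) : get_alt s = msum s.toList 0 := by
  show pvGo s.toList 0 0 = msum s.toList 0
  set cs := s.toList with hcs
  rw [goInv cs cs.length 0 0 (by omega) (Or.inl (upF_zero cs))]
  rw [msum_rec cs 0 (by omega), upF_zero, max_eq_right (downF_nn cs 0)]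
  ring

-- ===== VERDICT (by name: the statement is the Claim_ definition above) =====
theorem get_spec : Claim_equal_get := by
  intro s _
  show get s = get_alt s
  rw [A_eq_msum, B_eq_msum]
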